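-- pv_equiv track=rewrite | github.com/sassboi/aishell | src/aishell/cli.py | extract_cmd
-- ===== SOURCE A (Python) =====
-- def extract_cmd(text: str):
--     """
--     Find a single-line command in the form:
--       CMD: <...>
--     Returns (cmd, cleaned_text_without_cmdline)
--     """
--     lines = text.splitlines()
--     cmd_line_idx = None
--     cmd = None
--     for i, ln in enumerate(lines):
--         if ln.strip().startswith("CMD:"):
--             cmd_line_idx = i
--             cmd = ln.split("CMD:", 1)[1].strip()
--             break
--
--     if cmd_line_idx is None or not cmd:
--         return None, text
--
--     # Remove the CMD line from displayed response
--     cleaned = "\n".join([ln for j, ln in enumerate(lines) if j != cmd_line_idx]).strip()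
--     return cmd, cleaned
-- ===== SOURCE B (Python) =====
-- def extract_cmd(text: str):
--     cmd = None
--     kept = []
--     for line in text.splitlines():
--         if cmd is None and line.strip().startswith("CMD:"):
--             cmd = line.split("CMD:", 1)[1].strip()
--         else:
--             kept.append(line)
--     if not cmd:
--         return None, text
--     return cmd, "\n".join(kept).strip()
-- ===== Notes on version B (the rewrite author's own statement) =====
-- stated objective: simpler
-- what changed: Replaces A's two passes (enumerate-and-break to find the CMD line's index, then rebuild by filtering out that index) with a single content-driven pass that captures the first CMD line and accumulates all other lines, needing no indices.
import Mathlib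
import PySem

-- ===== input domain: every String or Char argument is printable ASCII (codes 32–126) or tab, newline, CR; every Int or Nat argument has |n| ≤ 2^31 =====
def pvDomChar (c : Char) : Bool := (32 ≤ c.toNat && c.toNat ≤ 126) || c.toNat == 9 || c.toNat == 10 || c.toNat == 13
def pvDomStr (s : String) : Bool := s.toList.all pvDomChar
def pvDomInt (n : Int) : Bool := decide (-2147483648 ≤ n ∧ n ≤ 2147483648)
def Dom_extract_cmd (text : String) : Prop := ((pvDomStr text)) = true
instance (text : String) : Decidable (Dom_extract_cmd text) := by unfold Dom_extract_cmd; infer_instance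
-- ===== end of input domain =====

-- B replaces A's find-the-index pass plus index-filtering rebuild pass by a single
-- content-driven accumulation pass (no indices); objective: simpler, same O(n) cost.

-- ===== PORT A =====
-- ln.split("CMD:", 1)[1].strip(); the getD defaults are unreachable: sep ≠ "" and the
-- caller only applies this to a line whose strip starts with "CMD:", so piece 1 exists.
def pvCmdOfA (ln : String) : String :=
  PySem.Str.strip (((PySem.Str.splitMax? ln "CMD:" 1).getD []).getD 1 "")

-- the for-loop with enumerate and break: first index i whose stripped line starts with "CMD:"
def pvFindCmdA : List String → Int → Option (Int × String)
  | [], _ => none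
  | ln :: rest, i =>
    if PySem.Str.startswith (PySem.Str.strip ln) "CMD:" then some (i, ln)
    else pvFindCmdA rest (i + 1)

def extract_cmd (text : String) : Option String × String :=
  let lines := PySem.Str.splitlines text
  match pvFindCmdA lines 0 with
  | none => (none, text)
  | some (i, ln) =>
    let cmd := pvCmdOfA ln
    if cmd = "" then (none, text)
    else
      (some cmd,
        PySem.Str.strip (PySem.Str.join "\n"
          ((PySem.List.enumerate lines 0).filterMap
            (fun p => if p.1 = i then none else some p.2))))

-- ===== PORT B =====
-- one fold over the lines with state (cmd, kept); kept.append(line) is st.2 ++ [line]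
def pvStepB (st : Option String × List String) (line : String) : Option String × List String :=
  match st.1 with
  | none =>
    if PySem.Str.startswith (PySem.Str.strip line) "CMD:" then
      (some (PySem.Str.strip (((PySem.Str.splitMax? line "CMD:" 1).getD []).getD 1 "")), st.2)
    else (none, st.2 ++ [line])
  | some c => (some c, st.2 ++ [line])

def extract_cmd_alt (text : String) : Option String × String :=
  let st := (PySem.Str.splitlines text).foldl pvStepB (none, [])
  match st.1 with
  | none => (none, text)                       -- "if not cmd": cmd is None
  | some c =>
    if c = "" then (none, text)                -- "if not cmd": cmd == ""
    else (some c, PySem.Str.strip (PySem.Str.join "\n" st.2))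

-- ===== PRECONDITION & SPEC =====
def Spec_extract_cmd (text : String) (out : Option String × String) : Prop := out = extract_cmd_alt text
instance (text : String) (out : Option String × String) : Decidable (Spec_extract_cmd text out) := by unfold Spec_extract_cmd; infer_instance

-- ===== CLAIM (what is proved, stated in full; the proofs are below) =====
def Claim_equal_extract_cmd : Prop := ∀ (text : String), Dom_extract_cmd text → Spec_extract_cmd text (extract_cmd text)

-- ===== LEMMAS AND PROOFS =====

-- once cmd is set, B's fold only appends the remaining lines
theorem foldB_some (lines : List String) (c : String) (kept : List String) :
    lines.foldl pvStepB (some c, kept) = (some c, kept ++ lines) := by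
  induction lines generalizing kept with
  | nil => simp
  | cons ln rest ih => simp [pvStepB, ih]

-- indices in enumerate lines k are ≥ k, so filtering out an index i < k keeps everything
theorem filter_ne_all (lines : List String) (k i : Int) (h : i < k) :
    (PySem.List.enumerate lines k).filterMap
      (fun p => if p.1 = i then none else some p.2) = lines := by
  induction lines generalizing k with
  | nil => simp
  | cons ln rest ih =>
    rw [PySem.List.enumerate_cons]
    simp only [List.filterMap_cons]
    rw [if_neg (by omega)]
    rw [ih (k + 1) (by omega)]

-- the main invariant relating A's search to B's fold, generalized over the start index and accumulator
theorem foldB_none (lines : List String) (kept : List String) (k : Int) :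
    (pvFindCmdA lines k = none →
      lines.foldl pvStepB (none, kept) = (none, kept ++ lines)) ∧
    (∀ i ln, pvFindCmdA lines k = some (i, ln) →
      k ≤ i ∧
      lines.foldl pvStepB (none, kept) =
        (some (pvCmdOfA ln),
          kept ++ (PySem.List.enumerate lines k).filterMap
            (fun p => if p.1 = i then none else some p.2))) := by
  induction lines generalizing kept k with
  | nil => simp [pvFindCmdA]
  | cons ln rest ih =>
    have hfind : pvFindCmdA (ln :: rest) k =
        if PySem.Str.startswith (PySem.Str.strip ln) "CMD:" then some (k, ln)
        else pvFindCmdA rest (k + 1) := rfl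
    have hstep : pvStepB (none, kept) ln =
        if PySem.Str.startswith (PySem.Str.strip ln) "CMD:" then
          (some (PySem.Str.strip (((PySem.Str.splitMax? ln "CMD:" 1).getD []).getD 1 "")), kept)
        else (none, kept ++ [ln]) := rfl
    by_cases hs : PySem.Str.startswith (PySem.Str.strip ln) "CMD:" = true
    · rw [hfind, if_pos hs]
      refine ⟨fun h => by simp at h, fun i ln' h => ?_⟩
      simp only [Option.some.injEq, Prod.mk.injEq] at h
      obtain ⟨hi, hln⟩ := h
      subst hi; subst hln
      refine ⟨le_refl _, ?_⟩
      rw [List.foldl_cons, hstep, if_pos hs, foldB_some]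
      rw [PySem.List.enumerate_cons]
      simp only [List.filterMap_cons]
      rw [filter_ne_all rest (k + 1) k (by omega)]
      rfl
    · rw [hfind, if_neg hs]
      have hst : (ln :: rest).foldl pvStepB (none, kept) =
          rest.foldl pvStepB (none, kept ++ [ln]) := by
        rw [List.foldl_cons, hstep, if_neg hs]
      refine ⟨fun h => ?_, fun i ln' h => ?_⟩
      · rw [hst, (ih (kept ++ [ln]) (k + 1)).1 h]
        simp
      · obtain ⟨hki, heq⟩ := (ih (kept ++ [ln]) (k + 1)).2 i ln' h
        refine ⟨by omega, ?_⟩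
        rw [hst, heq, PySem.List.enumerate_cons]
        simp only [List.filterMap_cons]
        rw [if_neg (by omega)]
        simp

-- ===== VERDICT (by name: the statement is the Claim_ definition above) =====
theorem extract_cmd_spec : Claim_equal_extract_cmd := by
  intro text _
  simp only [Spec_extract_cmd, extract_cmd, extract_cmd_alt]
  have h := foldB_none (PySem.Str.splitlines text) [] 0
  cases hf : pvFindCmdA (PySem.Str.splitlines text) 0 with
  | none =>
    rw [h.1 hf]
  | some p =>
    obtain ⟨i, ln⟩ := p
    obtain ⟨-, heq⟩ := h.2 i ln hf
    rw [heq]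
    simp
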